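-- pv_equiv track=rewrite | github.com/LotusCreme/CBVIR | KFE_module/color-based/utilities.py | KFE_acc_check
-- ===== SOURCE A (Python) =====
-- from collections import defaultdict
--
-- def KFE_acc_check(numbers, intervals):
--     # Create a defaultdict to store the counts for each interval
--     interval_counts = defaultdict(int)
--
--     # Iterate through the numbers
--     for number in numbers:
--         # Iterate through the intervals
--         for interval in intervals:
--             # Check if the number is within the interval
--             if interval[0] <= number <= interval[1]:
--                 # If it is, increment the count for this interval
--                 interval_counts[interval] += 1
--                 # We can break out of the loop here, since we only want to count
--                 # the number once, even if it is contained in multiple intervals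
--                 break
--     return interval_counts
-- ===== SOURCE B (Python) =====
-- from bisect import bisect_left, bisect_right
--
-- def KFE_acc_check(numbers, intervals):
--     # Phase 1: claim the sorted distinct numbers interval by interval via bisection,
--     # recording for each claimed value the first interval (in list order) containing it.
--     owner = {}
--     remaining = sorted(set(numbers))
--     for interval in intervals:
--         if not remaining:
--             break
--         i = bisect_left(remaining, interval[0])
--         if i < len(remaining):
--             j = bisect_right(remaining, interval[1], lo=i)
--             if j > i:
--                 for v in remaining[i:j]:
--                     owner[v] = interval
--                 remaining = remaining[:i] + remaining[j:]
--     # Phase 2: one pass over the numbers, so keys appear in first-touch order like A's dict.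
--     counts = {}
--     for n in numbers:
--         interval = owner.get(n)
--         if interval is not None:
--             counts[interval] = counts.get(interval, 0) + 1
--     return counts
-- ===== Notes on version B (the rewrite author's own statement) =====
-- stated objective: faster
-- what changed: B sorts the numbers once and, for each interval in order, bisects the sorted remaining numbers to count and remove the ones it claims, instead of A's linear scan of all intervals for every number.
import Mathlib
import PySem

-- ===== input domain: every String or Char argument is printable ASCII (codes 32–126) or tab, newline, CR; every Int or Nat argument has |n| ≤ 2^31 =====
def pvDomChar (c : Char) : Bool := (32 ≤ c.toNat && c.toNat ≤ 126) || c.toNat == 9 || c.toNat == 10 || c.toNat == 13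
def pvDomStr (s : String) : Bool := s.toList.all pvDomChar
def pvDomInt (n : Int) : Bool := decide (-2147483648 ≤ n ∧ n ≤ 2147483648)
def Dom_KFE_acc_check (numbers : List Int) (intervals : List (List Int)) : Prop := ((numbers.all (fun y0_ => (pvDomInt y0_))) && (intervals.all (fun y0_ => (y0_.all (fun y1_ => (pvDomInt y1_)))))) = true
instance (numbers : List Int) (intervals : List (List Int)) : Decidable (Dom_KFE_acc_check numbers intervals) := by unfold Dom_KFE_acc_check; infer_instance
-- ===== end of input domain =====

-- B replaces A's scan of all intervals per number by one sort of the distinct numbers plus a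
-- bisection pass per interval (then one counting pass over the numbers); equivalence is claimed
-- on Pre_, which is exactly where the Python A returns.

-- ===== PORT A =====
-- inner 'for interval in intervals' loop with its break
def pvAInner (n : Int) : List (List Int) → PySem.Dict (List Int) Int → PySem.Dict (List Int) Int
  | [], d => d
  | iv :: rest, d =>
    match PySem.List.pyGet? iv 0 with
    | none => d          -- Python: IndexError (interval[0] of an empty interval); outside Pre_
    | some lo =>
      if lo ≤ n then
        match PySem.List.pyGet? iv 1 with
        | none => d      -- Python: IndexError (interval[1] of a 1-element interval); outside Pre_
        | some hi =>
          if n ≤ hi then d.modify iv 0 (· + 1)   -- interval_counts[interval] += 1, then break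
          else pvAInner n rest d
      else pvAInner n rest d

def KFE_acc_check (numbers : List Int) (intervals : List (List Int)) : List (List Int × Int) :=
  (numbers.foldl (fun d n => pvAInner n intervals d) PySem.Dict.empty).items

-- ===== PORT B =====
-- phase 1 of Source B: 'for interval in intervals' over the state (remaining, owner);
-- bisect_right(remaining, hi, lo=i) is ported as i + bisectRight (remaining.drop i) hi,
-- which is exactly that stdlib call on the sorted list remaining.
def pvPhase1 : List (List Int) → List Int → PySem.Dict Int (List Int) → PySem.Dict Int (List Int)
  | [], _, own => own
  | iv :: rest, rem, own =>
    if rem.isEmpty then own    -- break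
    else
      match PySem.List.pyGet? iv 0 with
      | none => own            -- Python: IndexError; outside Pre_
      | some lo =>
        let i := PySem.List.bisectLeft rem lo
        if i < rem.length then
          match PySem.List.pyGet? iv 1 with
          | none => own        -- Python: IndexError; outside Pre_
          | some hi =>
            let j := i + PySem.List.bisectRight (rem.drop i) hi
            if i < j then
              pvPhase1 rest (rem.take i ++ rem.drop j)
                (((rem.drop i).take (j - i)).foldl (fun o v => o.insert v iv) own)
            else pvPhase1 rest rem own
        else pvPhase1 rest rem own

def KFE_acc_check_alt (numbers : List Int) (intervals : List (List Int)) : List (List Int × Int) :=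
  let own := pvPhase1 intervals
    (PySem.List.sorted (PySem.Set.ofList numbers) (fun x => x) false) PySem.Dict.empty
  (numbers.foldl (fun d n =>
      match own.get? n with
      | none => d
      | some interval => d.modify interval 0 (· + 1)) PySem.Dict.empty).items

-- ===== PRECONDITION & SPEC =====
-- helpers for Pre_: does interval iv contain n / is reading iv for n exception-free
def pvMatchesB (iv : List Int) (n : Int) : Bool :=
  decide (2 ≤ iv.length) && decide (iv.headI ≤ n) && decide (n ≤ iv.getD 1 0)
def pvSafeB (iv : List Int) (n : Int) : Bool :=
  decide (iv ≠ []) && (!decide (iv.headI ≤ n) || decide (2 ≤ iv.length))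

-- Pre_ is exactly the set of inputs on which the Python A returns: for every number, each
-- interval actually scanned (i.e. every interval not preceded by a containing one) must be
-- indexable without an IndexError.  A raises on every other input, so nothing A returns on
-- is excluded.
def Pre_KFE_acc_check (numbers : List Int) (intervals : List (List Int)) : Prop :=
  ∀ n ∈ numbers, ∀ k < intervals.length,
    (∀ l < k, pvMatchesB (intervals.getD l []) n = false) →
    pvSafeB (intervals.getD k []) n = true
instance (numbers : List Int) (intervals : List (List Int)) : Decidable (Pre_KFE_acc_check numbers intervals) := by unfold Pre_KFE_acc_check; infer_instance

def pvWitness_KFE_acc_check : List Int × List (List Int) := ([1, 5, 11], [[-3, 0], [4, 6], [10, 12]])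

def Spec_KFE_acc_check (numbers : List Int) (intervals : List (List Int)) (out : List (List Int × Int)) : Prop := out = KFE_acc_check_alt numbers intervals
instance (numbers : List Int) (intervals : List (List Int)) (out : List (List Int × Int)) : Decidable (Spec_KFE_acc_check numbers intervals out) := by unfold Spec_KFE_acc_check; infer_instance

-- ===== CLAIM (what is proved, stated in full; the proofs are below) =====
def Claim_equal_KFE_acc_check : Prop := ∀ (numbers : List Int) (intervals : List (List Int)), Dom_KFE_acc_check numbers intervals → Pre_KFE_acc_check numbers intervals → Spec_KFE_acc_check numbers intervals (KFE_acc_check numbers intervals)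

-- ===== LEMMAS AND PROOFS =====

-- proof-side: the scan-safety of one number against an interval list, as a structural predicate
def pvScan : List (List Int) → Int → Prop
  | [], _ => True
  | iv :: rest, n => pvSafeB iv n = true ∧ (pvMatchesB iv n = true ∨ pvScan rest n)

-- proof-side: the first interval (in list order) containing n, if any
def pvFm : List (List Int) → Int → Option (List Int)
  | [], _ => none
  | iv :: rest, n => if pvMatchesB iv n then some iv else pvFm rest n

theorem pyGet?_one_cons_cons (a b : Int) (t : List Int) :
    PySem.List.pyGet? (a :: b :: t) 1 = some b := by
  simp [PySem.List.pyGet?, PySem.List.pyIdx?]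

theorem pvScan_of_pre (ivs : List (List Int)) (n : Int)
    (h : ∀ k < ivs.length, (∀ l < k, pvMatchesB (ivs.getD l []) n = false) →
      pvSafeB (ivs.getD k []) n = true) : pvScan ivs n := by
  induction ivs with
  | nil => trivial
  | cons iv rest ih =>
    have hsafe := h 0 (by simp) (fun l hl => absurd hl (Nat.not_lt_zero l))
    simp only [List.getD_cons_zero] at hsafe
    refine ⟨hsafe, ?_⟩
    by_cases hm : pvMatchesB iv n = true
    · exact Or.inl hm
    · refine Or.inr (ih (fun k hk hl => ?_))
      have := h (k + 1) (by simpa using Nat.succ_lt_succ hk)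
        (fun l hl' => by
          cases l with
          | zero => simpa using Bool.eq_false_iff.2 (by simpa using hm)
          | succ l' => simpa using hl l' (by omega))
      simpa using this

-- Under scan-safety, A's inner loop counts exactly the first containing interval.
theorem pvAInner_eq_fm (n : Int) (ivs : List (List Int)) (d : PySem.Dict (List Int) Int)
    (h : pvScan ivs n) :
    pvAInner n ivs d = match pvFm ivs n with
      | none => d
      | some iv => d.modify iv 0 (· + 1) := by
  induction ivs generalizing d with
  | nil => rfl
  | cons iv rest ih =>
    obtain ⟨hsafe, hrest⟩ := h
    simp only [pvSafeB, Bool.and_eq_true, decide_eq_true_eq, Bool.or_eq_true,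
      Bool.not_eq_eq_eq_not, Bool.not_true, decide_eq_false_iff_not] at hsafe
    obtain ⟨hne, himp⟩ := hsafe
    match iv, hne with
    | a :: t, _ =>
      simp only [pvAInner, PySem.List.pyGet?_zero_cons, pvFm]
      by_cases hle : a ≤ n
      · have h2 : 2 ≤ (a :: t).length := by
          rcases himp with h' | h'
          · exact absurd (by simpa [List.headI] using hle) h'
          · exact h'
        match t, h2 with
        | b :: t', _ =>
          rw [pyGet?_one_cons_cons]
          by_cases hnb : n ≤ b
          · have hm : pvMatchesB (a :: b :: t') n = true := by
              simp [pvMatchesB, List.headI, List.getD, hle, hnb]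
            simp [hle, hnb, hm]
          · have hm : pvMatchesB (a :: b :: t') n = false := by
              simp [pvMatchesB, List.headI, List.getD, hnb]
            have hscan : pvScan rest n := by
              rcases hrest with h' | h'
              · rw [hm] at h'; cases h'
              · exact h'
            simp only [hle, if_true, hnb, if_false, hm, Bool.false_eq_true]
            exact ih d hscan
      · have hm : pvMatchesB (a :: t) n = false := by
          simp [pvMatchesB, List.headI, hle]
        have hscan : pvScan rest n := by
          rcases hrest with h' | h'
          · rw [hm] at h'; cases h'
          · exact h'
        simp only [hle, if_false, hm, Bool.false_eq_true]
        exact ih d hscan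

-- a fold of inserts of one fixed value
theorem get?_foldl_insert (S : List Int) (iv : List Int)
    (own : PySem.Dict Int (List Int)) (v : Int) :
    (S.foldl (fun o u => o.insert u iv) own).get? v =
      if v ∈ S then some iv else own.get? v := by
  induction S generalizing own with
  | nil => simp
  | cons u S' ih =>
    simp only [List.foldl_cons, ih]
    by_cases hv : v ∈ S'
    · simp [hv]
    · by_cases huv : v = u
      · subst huv; simp [hv, PySem.Dict.get?_insert_self]
      · simp [hv, huv, PySem.Dict.get?_insert_of_ne _ _ huv]

-- The main phase-1 invariant: after processing ivs, the owner of any still-unclaimed number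
-- is its first containing interval among ivs; other keys are untouched.
theorem pvPhase1_get (ivs : List (List Int)) :
    ∀ (rem : List Int) (own : PySem.Dict Int (List Int)),
    rem.Pairwise (· < ·) →
    (∀ v ∈ rem, pvScan ivs v) →
    (∀ v ∈ rem, own.get? v = none) →
    ∀ v, (pvPhase1 ivs rem own).get? v = if v ∈ rem then pvFm ivs v else own.get? v := by
  induction ivs with
  | nil =>
    intro rem own _ _ hown v
    by_cases hv : v ∈ rem
    · simp [pvPhase1, pvFm, hv, hown v hv]
    · simp [pvPhase1, hv]
  | cons iv rest ih =>
    intro rem own hsort hscan hown v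
    simp only [pvPhase1]
    by_cases hemp : rem.isEmpty
    · have : rem = [] := List.isEmpty_iff.1 hemp
      subst this; simp
    · have hne_rem : rem ≠ [] := fun h => hemp (by simp [h])
      obtain ⟨v0, hv0⟩ := List.exists_mem_of_ne_nil rem hne_rem
      have hsafe0 := (hscan v0 hv0).1
      simp only [pvSafeB, Bool.and_eq_true, decide_eq_true_eq, Bool.or_eq_true,
        Bool.not_eq_eq_eq_not, Bool.not_true, decide_eq_false_iff_not] at hsafe0
      simp only [hemp, Bool.false_eq_true, if_false]
      match hiv : iv, hsafe0.1 with
      | a :: t, _ =>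
        rw [PySem.List.pyGet?_zero_cons]
        simp only []
        have hple : rem.Pairwise (· ≤ ·) := hsort.imp (fun h => le_of_lt h)
        have bl := PySem.List.bisectLeft_spec rem a hple
        set i := PySem.List.bisectLeft rem a with hi_def
        -- facts about positions below / at-or-above i
        have hlt_lo : ∀ p (hp : p < rem.length), p < i → rem[p] < a := fun p hp h => bl.2.1 p hp h
        have hge_lo : ∀ p (hp : p < rem.length), i ≤ p → a ≤ rem[p] := fun p hp h => bl.2.2 p hp h
        by_cases hilen : i < rem.length
        · -- some unclaimed number is ≥ a, so interval[1] is read: safety forces 2 ≤ len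
          have hvi_mem : rem[i] ∈ rem := List.getElem_mem hilen
          have hsafei := (hscan _ hvi_mem).1
          simp only [pvSafeB, Bool.and_eq_true, decide_eq_true_eq, Bool.or_eq_true,
            Bool.not_eq_eq_eq_not, Bool.not_true, decide_eq_false_iff_not] at hsafei
          have h2 : 2 ≤ (a :: t).length := by
            rcases hsafei.2 with h' | h'
            · exact absurd (by simpa [List.headI] using hge_lo i hilen le_rfl) h'
            · exact h'
          match t, h2 with
          | b :: t', _ =>
            rw [pyGet?_one_cons_cons]
            simp only [hilen, if_true]
            have hpled : (rem.drop i).Pairwise (· ≤ ·) :=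
              List.Pairwise.sublist (List.drop_sublist _ _) hple
            have br := PySem.List.bisectRight_spec (rem.drop i) b hpled
            set r := PySem.List.bisectRight (rem.drop i) b with hr_def
            have hband : ∀ q (hq : q < (rem.drop i).length), q < r → (rem.drop i)[q] ≤ b :=
              fun q hq h => br.2.1 q hq h
            have habove : ∀ q (hq : q < (rem.drop i).length), r ≤ q → b < (rem.drop i)[q] :=
              fun q hq h => br.2.2 q hq h
            -- element-level bounds on the three zones of rem
            have L1 : ∀ u ∈ rem.take i, u < a := by
              intro u hu
              obtain ⟨q, hq, hval⟩ := List.getElem_of_mem hu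
              have hq' : q < i := by
                have := hq; simp [List.length_take] at this; omega
              have hqlen : q < rem.length := by omega
              have : (rem.take i)[q] = rem[q] := List.getElem_take
              rw [this] at hval
              subst hval; exact hlt_lo q hqlen hq'
            have L2 : ∀ u ∈ (rem.drop i).take r, a ≤ u ∧ u ≤ b := by
              intro u hu
              obtain ⟨q, hq, hval⟩ := List.getElem_of_mem hu
              have hq' : q < r := by
                have := hq; simp [List.length_take] at this; omega
              have hqlen : q < (rem.drop i).length := by
                have := hq; simp only [List.length_take, List.length_drop, lt_min_iff] at this
                simp only [List.length_drop]; omega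
              have heq : ((rem.drop i).take r)[q] = (rem.drop i)[q] := List.getElem_take
              rw [heq] at hval
              have hd : (rem.drop i)[q] = rem[i + q]'(by simp only [List.length_drop] at hqlen; omega) := by
                simp [List.getElem_drop]
              constructor
              · rw [← hval, hd]; exact hge_lo (i + q) (by simp only [List.length_drop] at hqlen; omega) (by omega)
              · rw [← hval]; exact hband q hqlen hq'
            have L3 : ∀ u ∈ rem.drop (i + r), b < u := by
              intro u hu
              have hdd : rem.drop (i + r) = (rem.drop i).drop r := by
                simp [List.drop_drop, Nat.add_comm]
              rw [hdd] at hu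
              obtain ⟨q, hq, hval⟩ := List.getElem_of_mem hu
              have hqlen : r + q < (rem.drop i).length := by
                simp only [List.length_drop] at hq ⊢; omega
              have : ((rem.drop i).drop r)[q] = (rem.drop i)[r + q] := by
                simp [List.getElem_drop, Nat.add_assoc]
              rw [this] at hval
              subst hval; exact habove (r + q) hqlen (by omega)
            have hdec : rem = rem.take i ++ ((rem.drop i).take r ++ rem.drop (i + r)) := by
              have hdd : rem.drop (i + r) = (rem.drop i).drop r := by
                simp [List.drop_drop, Nat.add_comm]
              rw [hdd, List.take_append_drop, List.take_append_drop]
            -- the three characterizations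
            have C1 : ∀ u, u ∈ (rem.drop i).take r ↔ u ∈ rem ∧ a ≤ u ∧ u ≤ b := by
              intro u
              constructor
              · intro hu
                refine ⟨?_, L2 u hu⟩
                exact ((List.take_sublist _ _).trans (List.drop_sublist _ _)).mem hu
              · rintro ⟨hu, hband'⟩
                rw [hdec] at hu
                rcases List.mem_append.1 hu with h' | h'
                · exact absurd (L1 u h') (by omega)
                · rcases List.mem_append.1 h' with h'' | h''
                  · exact h''
                  · exact absurd (L3 u h'') (by omega)
            have C2 : ∀ u, u ∈ rem.take i ++ rem.drop (i + r) ↔ u ∈ rem ∧ ¬(a ≤ u ∧ u ≤ b) := by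
              intro u
              constructor
              · intro hu
                rcases List.mem_append.1 hu with h' | h'
                · exact ⟨(List.take_sublist _ _).mem h', by have := L1 u h'; omega⟩
                · exact ⟨(List.drop_sublist _ _).mem h', by have := L3 u h'; omega⟩
              · rintro ⟨hu, hnband⟩
                rw [hdec] at hu
                rcases List.mem_append.1 hu with h' | h'
                · exact List.mem_append_left _ h'
                · rcases List.mem_append.1 h' with h'' | h''
                  · exact absurd (L2 u h'') hnband
                  · exact List.mem_append_right _ h''
            by_cases hij : i < i + r
            · simp only [hij, if_true]
              -- claimed slice S, new remaining rem', new owner own'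
              have hjr : i + r - i = r := by omega
              rw [hjr]
              set S := (rem.drop i).take r with hS_def
              set rem' := rem.take i ++ rem.drop (i + r) with hrem'_def
              set own' := S.foldl (fun o u => o.insert u (a :: b :: t')) own with hown'_def
              have hsort' : rem'.Pairwise (· < ·) := by
                refine List.Pairwise.sublist ?_ hsort
                rw [hdec]
                exact List.Sublist.append (List.Sublist.refl _)
                  (List.sublist_append_right _ _)
              have hmatch_iff : ∀ u, pvMatchesB (a :: b :: t') u = true ↔ a ≤ u ∧ u ≤ b := by
                intro u; simp [pvMatchesB, List.headI, List.getD]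
              have hscan' : ∀ u ∈ rem', pvScan rest u := by
                intro u hu
                have hu' := (C2 u).1 hu
                rcases (hscan u hu'.1).2 with h' | h'
                · exact absurd ((hmatch_iff u).1 h') hu'.2
                · exact h'
              have hown' : ∀ u ∈ rem', own'.get? u = none := by
                intro u hu
                rw [hown'_def, get?_foldl_insert]
                have hu' := (C2 u).1 hu
                have : u ∉ S := fun hs => hu'.2 ((C1 u).1 hs).2
                simp [this, hown u hu'.1]
              have := ih rem' own' hsort' hscan' hown' v
              rw [this]
              by_cases hv : v ∈ rem
              · by_cases hb : a ≤ v ∧ v ≤ b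
                · have hvS : v ∈ S := (C1 v).2 ⟨hv, hb⟩
                  have hv' : v ∉ rem' := fun h => ((C2 v).1 h).2 hb
                  have : own'.get? v = some (a :: b :: t') := by
                    rw [hown'_def, get?_foldl_insert]; simp [hvS]
                  simp only [hv', if_false, this, hv, if_true, pvFm,
                    (hmatch_iff v).2 hb, if_true]
                · have hv' : v ∈ rem' := (C2 v).2 ⟨hv, hb⟩
                  have hm : pvMatchesB (a :: b :: t') v = false := by
                    rw [Bool.eq_false_iff]; intro h; exact hb ((hmatch_iff v).1 h)
                  simp [hv', hv, pvFm, hm]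
              · have hv' : v ∉ rem' := fun h => hv ((C2 v).1 h).1
                have hvS : v ∉ S := fun h => hv ((C1 v).1 h).1
                have : own'.get? v = own.get? v := by
                  rw [hown'_def, get?_foldl_insert]; simp [hvS]
                simp [hv', hv, this]
            · -- r = 0: no remaining number lies in [a, b]
              have hr0 : r = 0 := by omega
              simp only [hij, if_false]
              have hnomatch : ∀ u ∈ rem, pvMatchesB (a :: b :: t') u = false := by
                intro u hu
                obtain ⟨p, hp, hval⟩ := List.getElem_of_mem hu
                rw [Bool.eq_false_iff]
                intro hm
                have hband' : a ≤ u ∧ u ≤ b := by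
                  have := hm; simp [pvMatchesB, List.headI, List.getD] at this; omega
                by_cases hpi : p < i
                · have := hlt_lo p hp hpi; omega
                · have hq : p - i < (rem.drop i).length := by simp; omega
                  have := habove (p - i) hq (by omega)
                  have hd : (rem.drop i)[p - i] = rem[i + (p - i)]'(by omega) := by
                    simp [List.getElem_drop]
                  rw [hd] at this
                  have : b < rem[p]'hp := by
                    have hip : i + (p - i) = p := by omega
                    simpa [hip] using this
                  omega
              have hscan' : ∀ u ∈ rem, pvScan rest u := by
                intro u hu
                rcases (hscan u hu).2 with h' | h'
                · rw [hnomatch u hu] at h'; cases h'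
                · exact h'
              rw [ih rem own hsort hscan' hown v]
              by_cases hv : v ∈ rem
              · simp [hv, pvFm, hnomatch v hv]
              · simp [hv]
        · -- every remaining number is < a: the interval matches nothing
          simp only [hilen, if_false]
          have hnomatch : ∀ u ∈ rem, pvMatchesB (a :: t) u = false := by
            intro u hu
            obtain ⟨p, hp, hval⟩ := List.getElem_of_mem hu
            rw [Bool.eq_false_iff]
            intro hm
            have : a ≤ u := by
              have := hm; simp [pvMatchesB, List.headI] at this; omega
            have := hlt_lo p hp (by omega)
            omega
          have hscan' : ∀ u ∈ rem, pvScan rest u := by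
            intro u hu
            rcases (hscan u hu).2 with h' | h'
            · rw [hnomatch u hu] at h'; cases h'
            · exact h'
          rw [ih rem own hsort hscan' hown v]
          by_cases hv : v ∈ rem
          · simp [hv, pvFm, hnomatch v hv]
          · simp [hv]

-- ===== VERDICT (by name: the statement is the Claim_ definition above) =====
theorem KFE_acc_check_spec : Claim_equal_KFE_acc_check := by
  intro numbers intervals _ hpre
  unfold Spec_KFE_acc_check KFE_acc_check KFE_acc_check_alt
  simp only []
  set rem0 := PySem.List.sorted (PySem.Set.ofList numbers) (fun x => x) false with hrem0
  have hmem : ∀ v, v ∈ rem0 ↔ v ∈ numbers := by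
    intro v
    rw [hrem0, PySem.List.mem_sorted, PySem.Set.mem_ofList]
  have hsort : rem0.Pairwise (· < ·) := PySem.List.sorted_ofList_pairwise_lt numbers
  have hscan0 : ∀ v ∈ rem0, pvScan intervals v := fun v hv =>
    pvScan_of_pre intervals v (hpre v ((hmem v).1 hv))
  have hown0 : ∀ v ∈ rem0, (PySem.Dict.empty : PySem.Dict Int (List Int)).get? v = none :=
    fun v _ => PySem.Dict.get?_empty v
  have hget := pvPhase1_get intervals rem0 PySem.Dict.empty hsort hscan0 hown0
  refine congrArg PySem.Dict.items ?_
  refine PySem.List.foldl_congr_mem numbers _ _ _ (fun d n hn => ?_)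
  rw [pvAInner_eq_fm n intervals d (pvScan_of_pre intervals n (hpre n hn))]
  rw [hget n]
  simp [(hmem n).2 hn]
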